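-- pv_equiv track=rewrite | github.com/MateusMendes0/TrabalhoGrafos | fred_funcoes.py | arvore_largura
-- ===== SOURCE A (Python) =====
-- from collections import deque
--
-- def arvore_largura(arestas: dict, vertice_inicial: int) -> int:
--     visitados = set()
--     fila = deque([vertice_inicial])
--
--     arvore = []
--
--     while fila:
--         vertice_atual = fila.popleft()
--         visitados.add(vertice_atual)
--
--         for id_aresta, destino, peso in sorted(arestas.get(vertice_atual, []), key=lambda x: x[1]):
--             if destino not in visitados:
--                 fila.append(destino)
--                 visitados.add(destino)
--                 arvore.append(id_aresta)
--
--     return arvore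
-- ===== SOURCE B (Python) =====
-- def arvore_largura(arestas: dict, vertice_inicial: int) -> int:
--     # level-synchronous BFS over pre-sorted adjacency lists (no deque)
--     adj = {u: sorted(lst, key=lambda x: x[1]) for u, lst in arestas.items()}
--     visitados = {vertice_inicial}
--     frontier = [vertice_inicial]
--     arvore = []
--     while frontier:
--         proximo = []
--         for vertice_atual in frontier:
--             for id_aresta, destino, peso in adj.get(vertice_atual, []):
--                 if destino not in visitados:
--                     visitados.add(destino)
--                     arvore.append(id_aresta)
--                     proximo.append(destino)
--         frontier = proximo
--     return arvore
-- ===== Notes on version B (the rewrite author's own statement) =====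
-- stated objective: alternative
-- what changed: Replaces the deque-driven vertex-at-a-time BFS (sorting each adjacency list at dequeue time) by a level-synchronous BFS: adjacency lists are all sorted once up front, then the loop processes whole frontier lists level by level with vertices marked visited at discovery; FIFO order equals level order, so the edge-id output is identical.
import Mathlib
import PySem

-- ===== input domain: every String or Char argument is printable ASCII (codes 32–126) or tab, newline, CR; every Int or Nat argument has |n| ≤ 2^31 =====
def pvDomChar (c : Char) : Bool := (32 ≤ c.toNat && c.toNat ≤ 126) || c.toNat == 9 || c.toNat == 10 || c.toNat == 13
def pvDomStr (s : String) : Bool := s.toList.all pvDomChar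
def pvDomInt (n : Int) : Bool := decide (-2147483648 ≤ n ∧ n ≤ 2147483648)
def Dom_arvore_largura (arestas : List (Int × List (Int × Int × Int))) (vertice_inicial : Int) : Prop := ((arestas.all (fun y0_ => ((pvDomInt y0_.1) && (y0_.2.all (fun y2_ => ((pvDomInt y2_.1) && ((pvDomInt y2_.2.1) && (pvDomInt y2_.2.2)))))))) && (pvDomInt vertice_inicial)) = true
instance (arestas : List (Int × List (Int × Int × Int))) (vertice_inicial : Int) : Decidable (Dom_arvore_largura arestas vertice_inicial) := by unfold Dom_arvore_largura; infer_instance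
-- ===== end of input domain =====

-- B re-implements the BFS tree level-synchronously over once-pre-sorted adjacency lists instead of A's
-- deque-driven vertex-at-a-time BFS with per-dequeue sorting; the returned edge-id list is proved identical.

-- ── helpers shared by the termination arguments of both ports ──
-- all destination vertices occurring in the adjacency structure (with multiplicity)
def pvDests (arestas : List (Int × List (Int × Int × Int))) : List Int :=
  arestas.flatMap (fun kv => kv.2.map (fun e => e.2.1))

-- number of destination occurrences not yet visited
def pvCnt (arestas : List (Int × List (Int × Int × Int))) (vis : List Int) : Nat :=
  (pvDests arestas).countP (fun d => !vis.contains d)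

def pvMeas (arestas : List (Int × List (Int × Int × Int))) (vis fila : List Int) : Nat :=
  pvCnt arestas vis + fila.length

-- (newly discovered destinations, collected edge ids) of one scan of an edge list
def descobre (vis : List Int) : List (Int × Int × Int) → List Int × List Int
  | [] => ([], [])
  | e :: es =>
    if e.2.1 ∈ vis then descobre vis es
    else
      let p := descobre (vis ++ [e.2.1]) es
      (e.2.1 :: p.1, e.1 :: p.2)

-- one whole BFS level, parametrised by the adjacency function
def nivel (E : Int → List (Int × Int × Int)) (vis : List Int) : List Int → List Int × List Int
  | [] => ([], [])
  | x :: f =>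
    let p := descobre vis (E x)
    let q := nivel E (vis ++ p.1) f
    (p.1 ++ q.1, p.2 ++ q.2)

def edgesOf (arestas : List (Int × List (Int × Int × Int))) (x : Int) : List (Int × Int × Int) :=
  PySem.List.sorted ((PySem.Dict.mk arestas).getD x []) (fun e => e.2.1)

-- the inner for-loop of both Pythons, characterised
theorem foldl_scan_eq (edges : List (Int × Int × Int)) :
    ∀ (vis : PySem.Set Int) (L A : List Int),
    edges.foldl
      (fun st e => if st.1.contains e.2.1 then st
                   else (PySem.Set.add st.1 e.2.1, st.2.1 ++ [e.2.1], st.2.2 ++ [e.1]))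
      ((vis, L, A) : PySem.Set Int × List Int × List Int)
    = (vis ++ (descobre vis edges).1, L ++ (descobre vis edges).1, A ++ (descobre vis edges).2) := by
  induction edges with
  | nil => intro vis L A; simp [descobre]
  | cons e es ih =>
    intro vis L A
    simp only [List.foldl_cons]
    by_cases h : e.2.1 ∈ vis
    · rw [if_pos (by exact (PySem.Set.contains_iff vis e.2.1).mpr h)]
      rw [ih]
      simp [descobre, h]
    · rw [if_neg (by exact fun hc => h ((PySem.Set.contains_iff vis e.2.1).mp hc))]
      have hadd : PySem.Set.add vis e.2.1 = vis ++ [e.2.1] := by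
        unfold PySem.Set.add
        rw [if_neg (by exact fun hc => h ((PySem.Set.contains_iff vis e.2.1).mp hc))]
      rw [hadd, ih]
      simp [descobre, h]

theorem descobre_props (edges : List (Int × Int × Int)) :
    ∀ vis : List Int, ((descobre vis edges).1.Nodup) ∧
      (∀ d ∈ (descobre vis edges).1, d ∉ vis ∧ d ∈ edges.map (fun e => e.2.1)) := by
  induction edges with
  | nil => intro vis; simp [descobre]
  | cons e es ih =>
    intro vis
    by_cases h : e.2.1 ∈ vis
    · simp only [descobre, h, if_true]
      refine ⟨(ih vis).1, fun d hd => ⟨((ih vis).2 d hd).1, ?_⟩⟩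
      simp only [List.map_cons, List.mem_cons]
      exact Or.inr ((ih vis).2 d hd).2
    · simp only [descobre, h, if_false]
      have hih := ih (vis ++ [e.2.1])
      constructor
      · refine List.nodup_cons.mpr ⟨fun hmem => ?_, hih.1⟩
        have := (hih.2 _ hmem).1
        simp at this
      · intro d hd
        rcases List.mem_cons.mp hd with rfl | hd'
        · exact ⟨h, by simp⟩
        · have := hih.2 d hd'
          simp only [List.mem_append, List.mem_singleton, not_or] at this
          exact ⟨this.1.1, by simp only [List.map_cons, List.mem_cons]; exact Or.inr this.2⟩

theorem dests_getD (arestas : List (Int × List (Int × Int × Int))) (x : Int) :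
    ∀ e ∈ (PySem.Dict.mk arestas).getD x [], e.2.1 ∈ pvDests arestas := by
  induction arestas with
  | nil => simp [PySem.Dict.getD, PySem.Dict.get?]
  | cons kv t ih =>
    intro e he
    rw [PySem.Dict.getD_eq_get?_getD, PySem.Dict.get?_mk_cons] at he
    simp only [pvDests, List.flatMap_cons, List.mem_append]
    by_cases hk : (kv.1 == x)
    · rw [if_pos hk] at he
      exact Or.inl (List.mem_map.mpr ⟨e, he, rfl⟩)
    · rw [if_neg hk] at he
      rw [← PySem.Dict.getD_eq_get?_getD] at he
      exact Or.inr (ih e he)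

theorem nivel_props (E : Int → List (Int × Int × Int)) (f : List Int) :
    ∀ vis : List Int, ((nivel E vis f).1.Nodup) ∧
      (∀ d ∈ (nivel E vis f).1, d ∉ vis ∧ ∃ x ∈ f, d ∈ (E x).map (fun e => e.2.1)) := by
  induction f with
  | nil => intro vis; simp [nivel]
  | cons x f' ih =>
    intro vis
    simp only [nivel]
    have hp := descobre_props (E x) vis
    have hq := ih (vis ++ (descobre vis (E x)).1)
    constructor
    · refine List.Nodup.append hp.1 hq.1 ?_
      intro d hd1 hd2
      have := (hq.2 d hd2).1
      simp only [List.mem_append, not_or] at this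
      exact this.2 hd1
    · intro d hd
      rcases List.mem_append.mp hd with hd1 | hd2
      · exact ⟨(hp.2 d hd1).1, x, List.mem_cons_self, (hp.2 d hd1).2⟩
      · have h1 := (hq.2 d hd2).1
        simp only [List.mem_append, not_or] at h1
        rcases (hq.2 d hd2).2 with ⟨y, hy, hmy⟩
        exact ⟨h1.1, y, List.mem_cons_of_mem _ hy, hmy⟩

theorem countP_lt_of_witness {l : List Int} {p q : Int → Bool}
    (himp : ∀ x ∈ l, q x = true → p x = true) (a : Int) (ha : a ∈ l)
    (hp : p a = true) (hq : q a = false) : l.countP q < l.countP p := by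
  rcases List.append_of_mem ha with ⟨s, t, rfl⟩
  have hs : s.countP q ≤ s.countP p :=
    List.countP_mono_left (fun x hx => himp x (by simp [hx]))
  have ht : t.countP q ≤ t.countP p :=
    List.countP_mono_left (fun x hx => himp x (by simp [hx]))
  simp [List.countP_append, hp, hq]
  omega

theorem countP_append_le (l : List Int) (ds : List Int) :
    ∀ vis : List Int, ds.Nodup → (∀ d ∈ ds, d ∈ l) → (∀ d ∈ ds, d ∉ vis) →
    l.countP (fun y => !(vis ++ ds).contains y) + ds.length ≤ l.countP (fun y => !vis.contains y) := by
  induction ds with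
  | nil => intro vis _ _ _; simp
  | cons d ds' ih =>
    intro vis hnd hsub hnv
    have hassoc : vis ++ d :: ds' = (vis ++ [d]) ++ ds' := by simp
    rw [hassoc]
    have h1 := ih (vis ++ [d]) (List.nodup_cons.mp hnd).2
      (fun x hx => hsub x (List.mem_cons_of_mem _ hx))
      (fun x hx => by
        simp only [List.mem_append, List.mem_singleton, not_or]
        exact ⟨hnv x (List.mem_cons_of_mem _ hx),
          fun hxd => (List.nodup_cons.mp hnd).1 (hxd ▸ hx)⟩)
    have h2 : l.countP (fun y => !(vis ++ [d]).contains y) < l.countP (fun y => !vis.contains y) := by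
      refine countP_lt_of_witness (fun x _ hx => ?_) d (hsub d List.mem_cons_self) ?_ ?_
      · simp at hx ⊢
        exact hx.1
      · simp [hnv d List.mem_cons_self]
      · simp
    simp only [List.length_cons]
    omega

theorem pvCnt_mono (arestas : List (Int × List (Int × Int × Int))) (vis w : List Int)
    (h : ∀ y ∈ vis, y ∈ w) : pvCnt arestas w ≤ pvCnt arestas vis := by
  refine List.countP_mono_left (fun x _ hx => ?_)
  simp at hx ⊢
  exact fun hmem => hx (h x hmem)

theorem measA_lt (arestas : List (Int × List (Int × Int × Int))) (vis rest : List Int) (x : Int) :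
    pvMeas arestas (PySem.Set.add vis x ++ (descobre (PySem.Set.add vis x) (edgesOf arestas x)).1)
      (rest ++ (descobre (PySem.Set.add vis x) (edgesOf arestas x)).1)
    < pvMeas arestas vis (x :: rest) := by
  have hprops := descobre_props (edgesOf arestas x) (PySem.Set.add vis x)
  set ds := (descobre (PySem.Set.add vis x) (edgesOf arestas x)).1 with hds
  have hsub : ∀ d ∈ ds, d ∈ pvDests arestas := by
    intro d hd
    rcases List.mem_map.mp (hprops.2 d hd).2 with ⟨e, he, rfl⟩
    exact dests_getD arestas x e ((PySem.List.mem_sorted _ _ _ _).mp he)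
  have h1 := countP_append_le (pvDests arestas) ds (PySem.Set.add vis x)
    hprops.1 hsub (fun d hd => (hprops.2 d hd).1)
  have h2 : pvCnt arestas (PySem.Set.add vis x) ≤ pvCnt arestas vis :=
    pvCnt_mono arestas vis _ (fun y hy => (PySem.Set.mem_add vis x y).mpr (Or.inl hy))
  simp only [pvMeas, pvCnt, List.length_append, List.length_cons] at *
  omega

-- the outer per-level fold of B, characterised
theorem foldl_level_eq (E : Int → List (Int × Int × Int)) (f : List Int) :
    ∀ (vis : PySem.Set Int) (prox arv : List Int),
    f.foldl
      (fun st x => (E x).foldl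
        (fun st e => if st.1.contains e.2.1 then st
                     else (PySem.Set.add st.1 e.2.1, st.2.1 ++ [e.2.1], st.2.2 ++ [e.1])) st)
      ((vis, prox, arv) : PySem.Set Int × List Int × List Int)
    = (vis ++ (nivel E vis f).1, prox ++ (nivel E vis f).1, arv ++ (nivel E vis f).2) := by
  induction f with
  | nil => intro vis prox arv; simp [nivel]
  | cons x f' ih =>
    intro vis prox arv
    simp only [List.foldl_cons, nivel]
    rw [foldl_scan_eq, ih]
    simp

theorem measNivel_lt (arestas : List (Int × List (Int × Int × Int)))
    (E : Int → List (Int × Int × Int))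
    (hE : ∀ y d, d ∈ (E y).map (fun e => e.2.1) → d ∈ pvDests arestas)
    (vis : List Int) (x : Int) (rest : List Int) :
    pvMeas arestas (vis ++ (nivel E vis (x :: rest)).1) ((nivel E vis (x :: rest)).1)
    < pvMeas arestas vis (x :: rest) := by
  have hprops := nivel_props E (x :: rest) vis
  set DS := (nivel E vis (x :: rest)).1 with hDS
  have hsub : ∀ d ∈ DS, d ∈ pvDests arestas := by
    intro d hd
    rcases (hprops.2 d hd).2 with ⟨y, _, hmy⟩
    exact hE y d hmy
  have h1 := countP_append_le (pvDests arestas) DS vis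
    hprops.1 hsub (fun d hd => (hprops.2 d hd).1)
  simp only [pvMeas, pvCnt, List.length_cons] at *
  omega

theorem measB_lt (adj : List (Int × List (Int × Int × Int))) (vis rest : List Int) (x : Int) :
    pvMeas adj (vis ++ (nivel (fun y => (PySem.Dict.mk adj).getD y []) vis (x :: rest)).1)
      ((nivel (fun y => (PySem.Dict.mk adj).getD y []) vis (x :: rest)).1)
    < pvMeas adj vis (x :: rest) := by
  refine measNivel_lt adj _ (fun y d hd => ?_) vis x rest
  rcases List.mem_map.mp hd with ⟨e, he, rfl⟩
  exact dests_getD adj y e he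

-- ===== PORT A =====
-- A's while-loop over the deque: state (visitados, fila, arvore)
def bfsA (arestas : List (Int × List (Int × Int × Int))) (vis : List Int) : List Int → List Int → List Int
  | [], arv => arv
  | vertice_atual :: rest, arv =>
    let visitados := PySem.Set.add vis vertice_atual
    let st := (PySem.List.sorted ((PySem.Dict.mk arestas).getD vertice_atual []) (fun e => e.2.1)).foldl
      (fun st e => if st.1.contains e.2.1 then st
                   else (PySem.Set.add st.1 e.2.1, st.2.1 ++ [e.2.1], st.2.2 ++ [e.1]))
      (visitados, rest, arv)
    bfsA arestas st.1 st.2.1 st.2.2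
termination_by fila arv => pvMeas arestas vis fila
decreasing_by
  simp only [dite_eq_ite, foldl_scan_eq]
  exact measA_lt arestas vis rest vertice_atual

def arvore_largura (arestas : List (Int × List (Int × Int × Int))) (vertice_inicial : Int) : List Int :=
  bfsA arestas [] [vertice_inicial] []

-- ===== PORT B =====
-- B's while-loop over whole levels: state (visitados, proximo, arvore); adj is pre-sorted
def bfsB (adj : List (Int × List (Int × Int × Int))) (vis : PySem.Set Int) : List Int → List Int → List Int
  | [], arv => arv
  | x :: rest, arv =>
    let st := (x :: rest).foldl
      (fun st vertice_atual => ((PySem.Dict.mk adj).getD vertice_atual []).foldl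
        (fun st e => if st.1.contains e.2.1 then st
                     else (PySem.Set.add st.1 e.2.1, st.2.1 ++ [e.2.1], st.2.2 ++ [e.1])) st)
      ((vis, ([] : List Int), arv) : PySem.Set Int × List Int × List Int)
    bfsB adj st.1 st.2.1 st.2.2
termination_by frontier arv => pvMeas adj vis frontier
decreasing_by
  simp only [dite_eq_ite, foldl_level_eq]
  exact measB_lt adj vis rest x

def arvore_largura_alt (arestas : List (Int × List (Int × Int × Int))) (vertice_inicial : Int) : List Int :=
  bfsB (arestas.map (fun kv => (kv.1, PySem.List.sorted kv.2 (fun e => e.2.1))))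
    [vertice_inicial] [vertice_inicial] []

-- ===== PRECONDITION & SPEC =====
def Spec_arvore_largura (arestas : List (Int × List (Int × Int × Int))) (vertice_inicial : Int) (out : List Int) : Prop := out = arvore_largura_alt arestas vertice_inicial
instance (arestas : List (Int × List (Int × Int × Int))) (vertice_inicial : Int) (out : List Int) : Decidable (Spec_arvore_largura arestas vertice_inicial out) := by unfold Spec_arvore_largura; infer_instance

-- ===== CLAIM (what is proved, stated in full; the proofs are below) =====
def Claim_equal_arvore_largura : Prop := ∀ (arestas : List (Int × List (Int × Int × Int))) (vertice_inicial : Int), Dom_arvore_largura arestas vertice_inicial → Spec_arvore_largura arestas vertice_inicial (arvore_largura arestas vertice_inicial)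

-- ===== LEMMAS AND PROOFS =====

-- B's pre-sorted dict looked up = sorted lookup of the original dict
theorem get?_mapsorted (arestas : List (Int × List (Int × Int × Int))) (x : Int) :
    (PySem.Dict.mk (arestas.map (fun kv => (kv.1, PySem.List.sorted kv.2 (fun e => e.2.1))))).get? x
    = ((PySem.Dict.mk arestas).get? x).map (fun l => PySem.List.sorted l (fun e => e.2.1)) := by
  induction arestas with
  | nil => simp [PySem.Dict.get?]
  | cons kv t ih =>
    simp only [List.map_cons]
    rw [PySem.Dict.get?_mk_cons, PySem.Dict.get?_mk_cons]
    by_cases hk : (kv.1 == x)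
    · simp [hk]
    · simp [hk, ih]

theorem getD_mapsorted (arestas : List (Int × List (Int × Int × Int))) (x : Int) :
    (PySem.Dict.mk (arestas.map (fun kv => (kv.1, PySem.List.sorted kv.2 (fun e => e.2.1))))).getD x []
    = edgesOf arestas x := by
  rw [PySem.Dict.getD_eq_get?_getD, get?_mapsorted]
  cases h : (PySem.Dict.mk arestas).get? x with
  | none => simp [edgesOf, PySem.Dict.getD_eq_get?_getD, h, PySem.List.sorted]
  | some v => simp [edgesOf, PySem.Dict.getD_eq_get?_getD, h]

-- dequeue-BFS processed level by level: processing a block f of already-visited vertices at the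
-- head of the queue appends exactly the level discoveries behind the queue
theorem bridgeAux (arestas : List (Int × List (Int × Int × Int))) (f : List Int) :
    ∀ (vis q p arv : List Int), (∀ x ∈ f, x ∈ vis) →
    bfsA arestas vis (f ++ (q ++ p)) arv
    = bfsA arestas (vis ++ (nivel (edgesOf arestas) vis f).1)
        (q ++ (p ++ (nivel (edgesOf arestas) vis f).1))
        (arv ++ (nivel (edgesOf arestas) vis f).2) := by
  induction f with
  | nil => intro vis q p arv _; simp [nivel]
  | cons x f' ih =>
    intro vis q p arv hf
    have hx : x ∈ vis := hf x List.mem_cons_self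
    have hf' : ∀ z ∈ f', z ∈ vis := fun z hz => hf z (List.mem_cons_of_mem _ hz)
    have hadd : PySem.Set.add vis x = vis := by
      unfold PySem.Set.add
      rw [if_pos ((PySem.Set.contains_iff vis x).mpr hx)]
    rw [List.cons_append]
    simp only [bfsA, hadd, foldl_scan_eq]
    rw [show PySem.List.sorted ((PySem.Dict.mk arestas).getD x []) (fun e => e.2.1)
        = edgesOf arestas x from rfl]
    have harr : f' ++ (q ++ p) ++ (descobre vis (edgesOf arestas x)).1
        = f' ++ (q ++ (p ++ (descobre vis (edgesOf arestas x)).1)) := by simp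
    rw [harr]
    rw [ih (vis ++ (descobre vis (edgesOf arestas x)).1) q
      (p ++ (descobre vis (edgesOf arestas x)).1)
      (arv ++ (descobre vis (edgesOf arestas x)).2)
      (fun z hz => List.mem_append.mpr (Or.inl (hf' z hz)))]
    simp [nivel, List.append_assoc]

theorem bfsA_eq_bfsB (arestas : List (Int × List (Int × Int × Int))) :
    ∀ (n : Nat) (vis f arv : List Int), pvMeas arestas vis f ≤ n → (∀ x ∈ f, x ∈ vis) →
    bfsA arestas vis f arv
    = bfsB (arestas.map (fun kv => (kv.1, PySem.List.sorted kv.2 (fun e => e.2.1)))) vis f arv := by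
  intro n
  induction n with
  | zero =>
    intro vis f arv hm hf
    cases f with
    | nil => simp [bfsA, bfsB]
    | cons x rest => exfalso; simp [pvMeas] at hm
  | succ n ih =>
    intro vis f arv hm hf
    cases f with
    | nil => simp [bfsA, bfsB]
    | cons x rest =>
      have hEeq : (fun y => (PySem.Dict.mk (arestas.map (fun kv => (kv.1, PySem.List.sorted kv.2 (fun e => e.2.1))))).getD y [])
          = edgesOf arestas := funext (fun y => getD_mapsorted arestas y)
      have hb := bridgeAux arestas (x :: rest) vis [] [] arv hf
      simp only [List.append_nil, List.nil_append] at hb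
      have hlt := measNivel_lt arestas (edgesOf arestas) (fun y d hd => by
        rcases List.mem_map.mp hd with ⟨e, he, rfl⟩
        exact dests_getD arestas y e ((PySem.List.mem_sorted _ _ _ _).mp he)) vis x rest
      rw [hb]
      conv_rhs => rw [bfsB]
      simp only [foldl_level_eq, hEeq, List.nil_append]
      exact ih (vis ++ (nivel (edgesOf arestas) vis (x :: rest)).1)
        (nivel (edgesOf arestas) vis (x :: rest)).1
        (arv ++ (nivel (edgesOf arestas) vis (x :: rest)).2)
        (by omega)
        (fun z hz => List.mem_append.mpr (Or.inr hz))

-- ===== VERDICT (by name: the statement is the Claim_ definition above) =====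
theorem arvore_largura_spec : Claim_equal_arvore_largura := by
  intro arestas s _
  unfold Spec_arvore_largura arvore_largura arvore_largura_alt
  have hadd : PySem.Set.add (([] : List Int) : PySem.Set Int) s = [s] := by
    simp [PySem.Set.add, PySem.Set.contains]
  have hEeq : (fun y => (PySem.Dict.mk (arestas.map (fun kv => (kv.1, PySem.List.sorted kv.2 (fun e => e.2.1))))).getD y [])
      = edgesOf arestas := funext (fun y => getD_mapsorted arestas y)
  conv_lhs => rw [bfsA]
  conv_rhs => rw [bfsB]
  simp only [hadd, foldl_scan_eq, foldl_level_eq]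
  rw [hEeq]
  rw [show PySem.List.sorted ((PySem.Dict.mk arestas).getD s []) (fun e => e.2.1)
      = edgesOf arestas s from rfl]
  simp only [nivel, List.append_nil, List.nil_append]
  exact bfsA_eq_bfsB arestas _ ([s] ++ (descobre [s] (edgesOf arestas s)).1)
    (descobre [s] (edgesOf arestas s)).1 (descobre [s] (edgesOf arestas s)).2
    (le_refl _) (fun z hz => List.mem_append.mpr (Or.inr hz))
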